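-- pv_equiv track=rewrite | github.com/ds4dh/CT-ADE | src/preprocessing_helpers.py | check_strict_match
-- ===== SOURCE A (Python) =====
-- def check_strict_match(list1, list2):
--     set1 = set(str(item).strip().lower() for item in list1 if item is not None)
--     set2 = set(str(item).strip().lower() for item in list2 if item is not None)
--
--     if len(set1) != len(set2) or len(set1) != len(list1):
--         # If the lengths of the sets or the length of set1 and list1 differ,
--         # it means there are duplicates or None values, so strict matching is not possible
--         return False
--
--     matched = set()
--     for item1 in set1:
--         match_found = False
--         for item2 in set2:
--             if item1 == item2 and item2 not in matched:
--                 match_found = True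
--                 matched.add(item2)
--                 break
--         if not match_found:
--             return False
--
--     return True
-- ===== SOURCE B (Python) =====
-- def check_strict_match(list1, list2):
--     norm1 = sorted(str(x).strip().lower() for x in list1 if x is not None)
--     if len(norm1) != len(list1):
--         return False  # list1 contained None
--     for i in range(1, len(norm1)):
--         if norm1[i] == norm1[i - 1]:
--             return False  # duplicate (after normalization) in list1
--     norm2 = sorted(str(x).strip().lower() for x in list2 if x is not None)
--     dedup2 = [x for i, x in enumerate(norm2) if i == 0 or x != norm2[i - 1]]
--     return norm1 == dedup2
-- ===== Notes on version B (the rewrite author's own statement) =====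
-- stated objective: alternative
-- what changed: Replaces hash-set construction plus a nested membership/matched scan with sort-then-linear-scan: duplicates in list1 are detected as adjacent equal pairs of the sorted normalized list, and set equality becomes comparing that list with the adjacency-deduplicated sorted normalized list2.
import Mathlib
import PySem

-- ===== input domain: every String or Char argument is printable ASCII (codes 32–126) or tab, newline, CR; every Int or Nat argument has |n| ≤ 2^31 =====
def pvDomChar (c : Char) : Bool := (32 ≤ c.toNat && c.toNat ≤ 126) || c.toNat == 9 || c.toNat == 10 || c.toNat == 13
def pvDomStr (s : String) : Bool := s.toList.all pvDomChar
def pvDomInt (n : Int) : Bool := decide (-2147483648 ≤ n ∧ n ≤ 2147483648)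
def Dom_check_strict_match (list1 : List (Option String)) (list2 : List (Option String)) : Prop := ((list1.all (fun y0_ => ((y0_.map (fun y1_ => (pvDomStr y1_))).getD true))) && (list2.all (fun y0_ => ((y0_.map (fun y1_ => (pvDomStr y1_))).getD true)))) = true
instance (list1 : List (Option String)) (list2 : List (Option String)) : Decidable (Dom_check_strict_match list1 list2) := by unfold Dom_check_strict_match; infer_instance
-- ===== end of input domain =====

-- B replaces A's set construction plus nested membership/matched scan by sort-then-linear-scan
-- (adjacent-duplicate check on sorted list1, adjacency dedup of sorted list2): an alternative algorithm.

-- ===== PORT A =====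
-- str(item).strip().lower()  (shared normalization helper of both Pythons)
def pvNorm (s : String) : String := PySem.Str.lower (PySem.Str.strip s)

-- inner 'for item2 in set2: if item1 == item2 and item2 not in matched: …break' loop:
-- some matched' on a match (match_found = True), none when the scan falls through
def pvInner (x : String) (matched : PySem.Set String) : List String → Option (PySem.Set String)
  | [] => none
  | y :: t =>
    if x == y && !(PySem.Set.contains matched y) then some (PySem.Set.add matched y)
    else pvInner x matched t

-- outer 'for item1 in set1' loop carrying the matched set
def pvLoopA (set2 : List String) : List String → PySem.Set String → Bool
  | [], _ => true
  | x :: xs, matched =>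
    match pvInner x matched set2 with
    | some m' => pvLoopA set2 xs m'
    | none => false

def check_strict_match (list1 : List (Option String)) (list2 : List (Option String)) : Bool :=
  let set1 : PySem.Set String := PySem.Set.ofList (list1.filterMap (fun o => o.map pvNorm))
  let set2 : PySem.Set String := PySem.Set.ofList (list2.filterMap (fun o => o.map pvNorm))
  if set1.length ≠ set2.length ∨ set1.length ≠ list1.length then false
  else pvLoopA set2 set1 PySem.Set.empty

-- ===== PORT B =====
-- 'for i in range(1, len(norm1)): if norm1[i] == norm1[i-1]: return False' as an adjacent scan
def pvHasAdjDup : List String → Bool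
  | a :: b :: t => a == b || pvHasAdjDup (b :: t)
  | _ => false

def pvDedupGo (prev : String) : List String → List String
  | [] => []
  | x :: t => if x == prev then pvDedupGo prev t else x :: pvDedupGo x t

-- '[x for i, x in enumerate(norm2) if i == 0 or x != norm2[i-1]]'
def pvDedupAdj : List String → List String
  | [] => []
  | a :: t => a :: pvDedupGo a t

def check_strict_match_alt (list1 : List (Option String)) (list2 : List (Option String)) : Bool :=
  let norm1 := PySem.List.sorted (list1.filterMap (fun o => o.map pvNorm)) (fun x => x) false
  if norm1.length ≠ list1.length then false
  else if pvHasAdjDup norm1 then false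
  else
    let norm2 := PySem.List.sorted (list2.filterMap (fun o => o.map pvNorm)) (fun x => x) false
    norm1 == pvDedupAdj norm2

-- ===== PRECONDITION & SPEC =====
def Spec_check_strict_match (list1 : List (Option String)) (list2 : List (Option String)) (out : Bool) : Prop := out = check_strict_match_alt list1 list2
instance (list1 : List (Option String)) (list2 : List (Option String)) (out : Bool) : Decidable (Spec_check_strict_match list1 list2 out) := by unfold Spec_check_strict_match; infer_instance

-- ===== CLAIM (what is proved, stated in full; the proofs are below) =====
def Claim_equal_check_strict_match : Prop := ∀ (list1 : List (Option String)) (list2 : List (Option String)), Dom_check_strict_match list1 list2 → Spec_check_strict_match list1 list2 (check_strict_match list1 list2)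

-- ===== LEMMAS AND PROOFS =====

-- the common characterization both programs compute
def pvP (list1 list2 : List (Option String)) : Prop :=
  let m1 := list1.filterMap (fun o => o.map pvNorm)
  let m2 := list2.filterMap (fun o => o.map pvNorm)
  m1.length = list1.length ∧ m1.Nodup ∧ m1.Perm (PySem.Set.ofList m2)

-- ---- A side ----

lemma pvInner_eq (x : String) (matched : PySem.Set String) (s2 : List String) :
    pvInner x matched s2 =
      if x ∈ s2 ∧ x ∉ matched then some (PySem.Set.add matched x) else none := by
  induction s2 with
  | nil => simp [pvInner]
  | cons y t ih =>
    simp only [pvInner, ih]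
    by_cases hxy : x = y
    · subst hxy
      by_cases hm : x ∈ matched <;> simp [hm]
    · have : (x == y) = false := by simp [hxy]
      simp [this, hxy]

lemma pvLoopA_iff (s2 : List String) (xs : List String) (matched : PySem.Set String)
    (hnd : xs.Nodup) (hdis : ∀ x ∈ xs, x ∉ matched) :
    pvLoopA s2 xs matched = true ↔ ∀ x ∈ xs, x ∈ s2 := by
  induction xs generalizing matched with
  | nil => simp [pvLoopA]
  | cons x t ih =>
    have hxm : x ∉ matched := hdis x (by simp)
    rw [List.nodup_cons] at hnd
    by_cases hx : x ∈ s2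
    · have : pvInner x matched s2 = some (PySem.Set.add matched x) := by
        rw [pvInner_eq]; simp [hx, hxm]
      simp only [pvLoopA, this]
      rw [ih (PySem.Set.add matched x) hnd.2 (fun y hy => by
        rw [PySem.Set.mem_add]
        rintro (h | rfl)
        · exact hdis y (by simp [hy]) h
        · exact hnd.1 hy)]
      simp [hx]
    · have : pvInner x matched s2 = none := by
        rw [pvInner_eq]; simp [hx]
      simp only [pvLoopA, this]
      simp [hx]

lemma pvOfList_sublist (xs : List String) : List.Sublist (PySem.Set.ofList xs) xs := by
  induction xs with
  | nil => simp [PySem.Set.ofList_nil]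
  | cons x t ih =>
    rw [PySem.Set.ofList_cons]
    exact List.Sublist.cons₂ x (List.Sublist.trans
      (by simp only [PySem.Set.discard]; exact List.filter_sublist) ih)

lemma pvA_iff (list1 list2 : List (Option String)) :
    check_strict_match list1 list2 = true ↔ pvP list1 list2 := by
  unfold check_strict_match pvP
  set m1 := list1.filterMap (fun o => o.map pvNorm) with hm1
  set m2 := list2.filterMap (fun o => o.map pvNorm) with hm2
  set s1 := PySem.Set.ofList m1 with hs1
  set s2 := PySem.Set.ofList m2 with hs2
  by_cases hlen : s1.length ≠ s2.length ∨ s1.length ≠ list1.length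
  · simp only [if_pos hlen]
    constructor
    · intro h; cases h
    · rintro ⟨h1, h2, h3⟩
      exfalso
      have e1 : s1 = m1 := hs1 ▸ PySem.Set.ofList_eq_self_of_nodup _ h2
      rcases hlen with h | h
      · exact h (by rw [e1, h3.length_eq])
      · exact h (by rw [e1, h1])
  · simp only [if_neg hlen]
    simp only [not_or, ne_eq, not_not] at hlen
    obtain ⟨hl12, hl1⟩ := hlen
    have hsub : List.Sublist s1 m1 := pvOfList_sublist m1
    have hm1len : m1.length ≤ list1.length := List.length_filterMap_le _ _
    have hslen : s1.length = m1.length :=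
      le_antisymm hsub.length_le (hl1 ▸ hm1len)
    have e1 : s1 = m1 := hsub.eq_of_length hslen
    have hnd1 : m1.Nodup := e1 ▸ PySem.Set.nodup_ofList m1
    rw [pvLoopA_iff s2 s1 PySem.Set.empty (by rw [e1]; exact hnd1)
      (by intro x hx; simp [PySem.Set.empty])]
    constructor
    · intro hsubm
      refine ⟨by omega, hnd1, ?_⟩
      have hsp : List.Subperm m1 s2 :=
        List.subperm_of_subset hnd1 (fun x hx => hsubm x (by rw [e1]; exact hx))
      exact hsp.perm_of_length_le (by omega)
    · rintro ⟨h1, h2, h3⟩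
      intro x hx
      exact h3.mem_iff.mp (by rw [← e1]; exact hx)

-- ---- B side ----

lemma pvHasAdjDup_false_iff (l : List String) (hs : l.Pairwise (· ≤ ·)) :
    pvHasAdjDup l = false ↔ l.Pairwise (· < ·) := by
  induction l with
  | nil => simp [pvHasAdjDup]
  | cons a t ih =>
    cases t with
    | nil => simp [pvHasAdjDup]
    | cons b t' =>
      rw [List.pairwise_cons] at hs
      rw [show pvHasAdjDup (a :: b :: t') = ((a == b) || pvHasAdjDup (b :: t')) from rfl,
        Bool.or_eq_false_iff, beq_eq_false_iff_ne, ih hs.2]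
      constructor
      · rintro ⟨hab, hbt⟩
        have hab' : a < b := lt_of_le_of_ne (hs.1 b (by simp)) hab
        rw [List.pairwise_cons]
        refine ⟨fun y hy => ?_, hbt⟩
        rcases List.mem_cons.mp hy with rfl | hy
        · exact hab'
        · exact lt_trans hab' (List.rel_of_pairwise_cons hbt hy)
      · intro h
        rw [List.pairwise_cons] at h
        exact ⟨ne_of_lt (h.1 b (by simp)), h.2⟩

lemma pvDedupGo_spec (t : List String) : ∀ (prev : String), (prev :: t).Pairwise (· ≤ ·) →
    (prev :: pvDedupGo prev t).Pairwise (· < ·) ∧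
      (∀ y, y ∈ pvDedupGo prev t ↔ y ∈ t ∧ y ≠ prev) := by
  induction t with
  | nil => intro prev _; simp [pvDedupGo]
  | cons x t' ih =>
    intro prev hp
    rw [List.pairwise_cons] at hp
    have hpx : prev ≤ x := hp.1 x (by simp)
    have hxt' : (x :: t').Pairwise (· ≤ ·) := hp.2
    by_cases hxp : x = prev
    · have hrec := ih prev (by rw [← hxp]; exact hxt')
      simp only [pvDedupGo, if_pos (by simp [hxp] : (x == prev) = true)]
      refine ⟨hrec.1, fun y => ?_⟩
      rw [hrec.2 y]
      constructor
      · rintro ⟨hy, hne⟩; exact ⟨by simp [hy], hne⟩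
      · rintro ⟨hy, hne⟩
        rcases List.mem_cons.mp hy with rfl | hy
        · exact absurd hxp (by exact hne)
        · exact ⟨hy, hne⟩
    · have hpxlt : prev < x := lt_of_le_of_ne hpx (Ne.symm hxp)
      have hrec := ih x hxt'
      simp only [pvDedupGo, if_neg (by simp [hxp] : ¬ ((x == prev) = true))]
      constructor
      · rw [List.pairwise_cons]
        refine ⟨fun y hy => ?_, hrec.1⟩
        rcases List.mem_cons.mp hy with rfl | hy
        · exact hpxlt
        · obtain ⟨hyt, _⟩ := (hrec.2 y).mp hy
          exact lt_of_lt_of_le hpxlt (List.rel_of_pairwise_cons hxt' hyt)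
      · intro y
        constructor
        · intro hy
          rcases List.mem_cons.mp hy with rfl | hy
          · exact ⟨by simp, hxp⟩
          · obtain ⟨hyt, _⟩ := (hrec.2 y).mp hy
            have hxy : x ≤ y := List.rel_of_pairwise_cons hxt' hyt
            exact ⟨by simp [hyt], ne_of_gt (lt_of_lt_of_le hpxlt hxy)⟩
        · rintro ⟨hy, hne⟩
          rcases List.mem_cons.mp hy with rfl | hy
          · exact List.mem_cons_self
          · by_cases hyx : y = x
            · rw [hyx]; exact List.mem_cons_self
            · exact List.mem_cons.mpr (Or.inr ((hrec.2 y).mpr ⟨hy, hyx⟩))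

lemma pvDedupAdj_spec (l : List String) (h : l.Pairwise (· ≤ ·)) :
    (pvDedupAdj l).Pairwise (· < ·) ∧ ∀ y, y ∈ pvDedupAdj l ↔ y ∈ l := by
  cases l with
  | nil => simp [pvDedupAdj]
  | cons a t =>
    have hs := pvDedupGo_spec t a h
    refine ⟨hs.1, fun y => ?_⟩
    simp only [pvDedupAdj, List.mem_cons, hs.2 y]
    by_cases hya : y = a <;> simp [hya]

lemma pvB_iff (list1 list2 : List (Option String)) :
    check_strict_match_alt list1 list2 = true ↔ pvP list1 list2 := by
  unfold check_strict_match_alt pvP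
  set m1 := list1.filterMap (fun o => o.map pvNorm) with hm1
  set m2 := list2.filterMap (fun o => o.map pvNorm) with hm2
  set n1 := PySem.List.sorted m1 (fun x => x) false with hn1
  set n2 := PySem.List.sorted m2 (fun x => x) false with hn2
  have hperm1 : n1.Perm m1 := PySem.List.sorted_perm m1 (fun x => x) false
  have hpw1 : n1.Pairwise (· ≤ ·) := by
    simpa using PySem.List.sorted_pairwise m1 (fun x => x)
  have hpw2 : n2.Pairwise (· ≤ ·) := by
    simpa using PySem.List.sorted_pairwise m2 (fun x => x)
  have hlen1 : n1.length = m1.length := PySem.List.length_sorted m1 (fun x => x) false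
  by_cases h1 : n1.length = list1.length
  · rw [if_neg (by omega)]
    by_cases h2 : pvHasAdjDup n1
    · rw [if_pos h2]
      constructor
      · intro h; cases h
      · rintro ⟨_, hnd, _⟩
        have hlt : n1.Pairwise (· < ·) := by
          have hne : n1.Nodup := hperm1.nodup_iff.mpr hnd
          exact (List.Pairwise.and hpw1 hne).imp (fun h => lt_of_le_of_ne h.1 h.2)
        rw [(pvHasAdjDup_false_iff n1 hpw1).mpr hlt] at h2
        cases h2
    · rw [if_neg h2]
      have hlt1 : n1.Pairwise (· < ·) :=
        (pvHasAdjDup_false_iff n1 hpw1).mp (by simpa using h2)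
      have hnd1 : m1.Nodup := hperm1.nodup_iff.mp (hlt1.imp ne_of_lt)
      have hded := pvDedupAdj_spec n2 hpw2
      have hdeq : pvDedupAdj n2 = PySem.List.sorted (PySem.Set.ofList m2) (fun x => x) false := by
        refine Eq.symm (PySem.List.sorted_eq_of_perm_of_pairwise_lt _ _ _ ?_ ?_)
        · refine (List.perm_ext_iff_of_nodup (hded.1.imp ne_of_lt)
            (PySem.Set.nodup_ofList m2)).mpr (fun y => ?_)
          rw [hded.2 y, PySem.Set.mem_ofList]
          exact PySem.List.mem_sorted m2 (fun x => x) false y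
        · simpa using hded.1
      show (n1 == pvDedupAdj n2) = true ↔
        (m1.length = list1.length ∧ m1.Nodup ∧ m1.Perm (PySem.Set.ofList m2))
      rw [hdeq]
      simp only [beq_iff_eq]
      constructor
      · intro heq
        exact ⟨by omega, hnd1, by rw [← PySem.List.sorted_id_eq_sorted_id_iff_perm]; exact heq⟩
      · rintro ⟨_, _, h3⟩
        rw [PySem.List.sorted_id_eq_sorted_id_iff_perm]
        exact h3
  · rw [if_pos (by omega)]
    constructor
    · intro h; cases h
    · rintro ⟨hl, _, _⟩; exact absurd (show n1.length = list1.length by omega) h1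

-- ===== VERDICT (by name: the statement is the Claim_ definition above) =====
theorem check_strict_match_spec : Claim_equal_check_strict_match := by
  intro list1 list2 _
  unfold Spec_check_strict_match
  rw [Bool.eq_iff_iff, pvA_iff, pvB_iff]
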